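-- pv_equiv track=rewrite | github.com/zhangtao0408/awesome-ascend-skills | external/gitcode-ascend/megatron-change-analyzer/scripts/build_feature_events.py | infer_areas
-- ===== SOURCE A (Python) =====
-- def infer_areas(files: list[str]) -> list[str]:
--     areas: set[str] = set()
--     for path in files:
--         if "dist_checkpointing" in path or "checkpoint" in path:
--             areas.add("checkpointing")
--         if "training/" in path or path.startswith("megatron/training"):
--             areas.add("training")
--         if "config/" in path or "arguments.py" in path or "training_config.py" in path:
--             areas.add("config")
--         if "distributed" in path or "parallel" in path:
--             areas.add("distributed")
--         if "optimizer" in path: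
--             areas.add("optimizer")
--         if path.startswith("tests/"):
--             areas.add("tests")
--     return sorted(areas) or ["misc"]
-- ===== SOURCE B (Python) =====
-- RULES = [
--     ("checkpointing", lambda p: "dist_checkpointing" in p or "checkpoint" in p),
--     ("config", lambda p: "config/" in p or "arguments.py" in p or "training_config.py" in p),
--     ("distributed", lambda p: "distributed" in p or "parallel" in p),
--     ("optimizer", lambda p: "optimizer" in p),
--     ("tests", lambda p: p.startswith("tests/")),
--     ("training", lambda p: "training/" in p or p.startswith("megatron/training")),
-- ]
--
--
-- def infer_areas(files: list[str]) -> list[str]: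
--     tags = [tag for tag, pred in RULES if any(pred(p) for p in files)]
--     return tags or ["misc"]
-- ===== Notes on version B (the rewrite author's own statement) =====
-- stated objective: idiomatic
-- what changed: Replaces the per-file branch battery accumulating into a set (then sorted with a fallback) by a data-driven rules table in tag-sorted order, filtered by whether any file matches each rule, inverting the loop nesting and removing the set and the sort.
import Mathlib
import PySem

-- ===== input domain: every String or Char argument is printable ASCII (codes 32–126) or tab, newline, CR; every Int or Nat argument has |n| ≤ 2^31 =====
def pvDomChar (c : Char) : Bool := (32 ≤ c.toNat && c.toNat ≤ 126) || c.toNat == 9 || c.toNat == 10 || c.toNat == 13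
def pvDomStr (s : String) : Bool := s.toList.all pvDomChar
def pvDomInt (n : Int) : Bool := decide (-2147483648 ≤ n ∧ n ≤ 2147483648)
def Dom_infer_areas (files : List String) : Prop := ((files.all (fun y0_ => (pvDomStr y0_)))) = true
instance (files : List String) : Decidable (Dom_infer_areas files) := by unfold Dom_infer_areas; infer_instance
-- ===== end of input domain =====

-- B replaces A's per-file branch battery + set + sort by a tag-sorted rules table filtered over the files (alternative decomposition, same cost).

-- ===== PORT A =====
-- one iteration of A's loop body: the six conditional set.add's, in order
def inferStep (areas : PySem.Set String) (path : String) : PySem.Set String :=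
  let areas := if PySem.Str.isIn "dist_checkpointing" path || PySem.Str.isIn "checkpoint" path then
      PySem.Set.add areas "checkpointing" else areas
  let areas := if PySem.Str.isIn "training/" path || PySem.Str.startswith path "megatron/training" then
      PySem.Set.add areas "training" else areas
  let areas := if PySem.Str.isIn "config/" path || PySem.Str.isIn "arguments.py" path || PySem.Str.isIn "training_config.py" path then
      PySem.Set.add areas "config" else areas
  let areas := if PySem.Str.isIn "distributed" path || PySem.Str.isIn "parallel" path then
      PySem.Set.add areas "distributed" else areas
  let areas := if PySem.Str.isIn "optimizer" path then
      PySem.Set.add areas "optimizer" else areas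
  let areas := if PySem.Str.startswith path "tests/" then
      PySem.Set.add areas "tests" else areas
  areas

def infer_areas (files : List String) : List String :=
  let areas : PySem.Set String := files.foldl inferStep PySem.Set.empty
  let res := PySem.List.sorted areas (fun x => x) false
  if res = [] then ["misc"] else res

-- ===== PORT B =====
-- the RULES table of Source B: (tag, predicate), tags in sorted order
def pvRules : List (String × (String → Bool)) :=
  [ ("checkpointing", fun p => PySem.Str.isIn "dist_checkpointing" p || PySem.Str.isIn "checkpoint" p),
    ("config", fun p => PySem.Str.isIn "config/" p || PySem.Str.isIn "arguments.py" p || PySem.Str.isIn "training_config.py" p),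
    ("distributed", fun p => PySem.Str.isIn "distributed" p || PySem.Str.isIn "parallel" p),
    ("optimizer", fun p => PySem.Str.isIn "optimizer" p),
    ("tests", fun p => PySem.Str.startswith p "tests/"),
    ("training", fun p => PySem.Str.isIn "training/" p || PySem.Str.startswith p "megatron/training") ]

def infer_areas_alt (files : List String) : List String :=
  let tags := (pvRules.filter (fun r => files.any r.2)).map (fun r => r.1)
  if tags = [] then ["misc"] else tags

-- ===== PRECONDITION & SPEC =====
def Spec_infer_areas (files : List String) (out : List String) : Prop := out = infer_areas_alt files
instance (files : List String) (out : List String) : Decidable (Spec_infer_areas files out) := by unfold Spec_infer_areas; infer_instance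

-- ===== CLAIM (what is proved, stated in full; the proofs are below) =====
def Claim_equal_infer_areas : Prop := ∀ (files : List String), Dom_infer_areas files → Spec_infer_areas files (infer_areas files)

-- ===== LEMMAS AND PROOFS =====

-- which tags a single path contributes, as a proposition
def tagOf (p x : String) : Prop :=
  (x = "checkpointing" ∧ (PySem.Str.isIn "dist_checkpointing" p || PySem.Str.isIn "checkpoint" p) = true) ∨
  (x = "training" ∧ (PySem.Str.isIn "training/" p || PySem.Str.startswith p "megatron/training") = true) ∨
  (x = "config" ∧ (PySem.Str.isIn "config/" p || PySem.Str.isIn "arguments.py" p || PySem.Str.isIn "training_config.py" p) = true) ∨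
  (x = "distributed" ∧ (PySem.Str.isIn "distributed" p || PySem.Str.isIn "parallel" p) = true) ∨
  (x = "optimizer" ∧ (PySem.Str.isIn "optimizer" p) = true) ∨
  (x = "tests" ∧ PySem.Str.startswith p "tests/" = true)

theorem mem_addIf (s : PySem.Set String) (t x : String) (c : Bool) :
    (x ∈ (if c then PySem.Set.add s t else s)) ↔ x ∈ s ∨ (x = t ∧ c = true) := by
  cases c <;> simp [PySem.Set.mem_add]

theorem nodup_addIf (s : PySem.Set String) (t : String) (c : Bool) (h : s.Nodup) :
    (if c then PySem.Set.add s t else s).Nodup := by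
  cases c <;> simp [PySem.Set.nodup_add, h]

set_option maxHeartbeats 4000000 in
theorem mem_inferStep (s : PySem.Set String) (p x : String) :
    x ∈ inferStep s p ↔ x ∈ s ∨ tagOf p x := by
  unfold inferStep tagOf
  simp only [mem_addIf]
  tauto

theorem nodup_inferStep (s : PySem.Set String) (p : String) (h : s.Nodup) :
    (inferStep s p).Nodup := by
  unfold inferStep
  exact nodup_addIf _ _ _ (nodup_addIf _ _ _ (nodup_addIf _ _ _ (nodup_addIf _ _ _ (nodup_addIf _ _ _ (nodup_addIf _ _ _ h)))))

theorem mem_foldl_inferStep (files : List String) (s : PySem.Set String) (x : String) :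
    x ∈ files.foldl inferStep s ↔ x ∈ s ∨ ∃ p ∈ files, tagOf p x := by
  induction files generalizing s with
  | nil => simp
  | cons p t ih => simp [List.foldl_cons, ih, mem_inferStep]; tauto

theorem nodup_foldl_inferStep (files : List String) (s : PySem.Set String) (h : s.Nodup) :
    (files.foldl inferStep s).Nodup := by
  induction files generalizing s with
  | nil => exact h
  | cons p t ih => exact ih _ (nodup_inferStep _ _ h)

set_option maxHeartbeats 4000000 in
theorem tagOf_iff (p x : String) : tagOf p x ↔ ∃ r ∈ pvRules, r.1 = x ∧ r.2 p = true := by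
  simp only [pvRules, tagOf, List.mem_cons, List.not_mem_nil, or_false, exists_eq_or_imp,
    exists_eq_left, eq_comm]
  tauto

set_option maxHeartbeats 4000000 in
theorem mem_tags (files : List String) (x : String) :
    x ∈ (pvRules.filter (fun r => files.any r.2)).map (fun r => r.1) ↔
      ∃ p ∈ files, tagOf p x := by
  constructor
  · intro h
    obtain ⟨r, hr, hx⟩ := List.mem_map.mp h
    obtain ⟨hrm, hany⟩ := List.mem_filter.mp hr
    obtain ⟨p, hp, hpred⟩ := List.any_eq_true.mp hany
    exact ⟨p, hp, (tagOf_iff p x).mpr ⟨r, hrm, hx, by simpa using hpred⟩⟩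
  · rintro ⟨p, hp, ht⟩
    obtain ⟨r, hrm, hx, hpred⟩ := (tagOf_iff p x).mp ht
    exact List.mem_map.mpr ⟨r, List.mem_filter.mpr ⟨hrm, List.any_eq_true.mpr ⟨p, hp, by simpa using hpred⟩⟩, hx⟩

theorem tags_pairwise (files : List String) :
    ((pvRules.filter (fun r => files.any r.2)).map (fun r => r.1)).Pairwise (· < ·) := by
  have hsub : ((pvRules.filter (fun r => files.any r.2)).map (fun r => r.1)).Sublist
      (pvRules.map (fun r => r.1)) := List.filter_sublist.map _
  have hall : (pvRules.map (fun r => r.1)).Pairwise (fun a b : String => a < b) := by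
    simp [pvRules]; decide
  exact hall.sublist hsub

theorem sorted_eq_tags (files : List String) :
    PySem.List.sorted (files.foldl inferStep PySem.Set.empty) (fun x => x) false =
      (pvRules.filter (fun r => files.any r.2)).map (fun r => r.1) := by
  apply PySem.List.sorted_eq_of_perm_of_pairwise_lt
  · rw [List.perm_ext_iff_of_nodup]
    · intro x
      rw [mem_tags, mem_foldl_inferStep]
      simp [PySem.Set.empty]
    · have hsub : ((pvRules.filter (fun r => files.any r.2)).map (fun r => r.1)).Sublist
          (pvRules.map (fun r => r.1)) := List.filter_sublist.map _
      exact hsub.nodup (by simp [pvRules])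
    · exact nodup_foldl_inferStep _ _ (by simp [PySem.Set.empty])
  · exact tags_pairwise files

-- ===== VERDICT (by name: the statement is the Claim_ definition above) =====
theorem infer_areas_spec : Claim_equal_infer_areas := by
  intro files _
  unfold Spec_infer_areas infer_areas infer_areas_alt
  simp only [sorted_eq_tags]
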